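-- pv_equiv track=rewrite | github.com/sonambharti/Python | DP/minPoints.py | minPointsDP
-- ===== SOURCE A (Python) =====
-- def minPointsDP(points):
--     m, n = len(points), len(points[0])
--     # Initialize a 2D DP array to store the minimum initial points required to reach each cell
--     dp = [[float('inf')] * n for _ in range(m)]
--     # Calculate the minimum initial points required to reach the last cell using dynamic programming
--     for i in range(m - 1, -1, -1):
--         for j in range(n - 1, -1, -1):
--             if i == m - 1 and j == n - 1:
--                 dp[i][j] = max(1, 1 - points[i][j])
--             else:
--                 right_points = dp[i][j + 1] if j + 1 < n else float('inf')
--                 bottom_points = dp[i + 1][j] if i + 1 < m else float('inf')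
--                 dp[i][j] = max(1, min(right_points, bottom_points) - points[i][j])
--     # The minimum initial points required to reach the last cell is stored in dp[0][0]
--     return dp[0][0]
-- ===== SOURCE B (Python) =====
-- def minPointsDP(points):
--     n = len(points[0])
--
--     def bottom_row(row):
--         # dp row for the bottom grid row, built by recursion from the right
--         if len(row) == 1:
--             return [max(1, 1 - row[0])]
--         suf = bottom_row(row[1:])
--         return [max(1, suf[0] - row[0])] + suf
--
--     def mid_row(row, below):
--         # dp row given the dp row directly below, recursion from the right
--         if len(row) == 1:
--             return [max(1, below[0] - row[0])]
--         suf = mid_row(row[1:], below[1:])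
--         return [max(1, min(suf[0], below[0]) - row[0])] + suf
--
--     below = bottom_row(points[-1][:n])
--     for row in reversed(points[:-1]):
--         below = mid_row(row[:n], below)
--     return below[0]
-- ===== Notes on version B (the rewrite author's own statement) =====
-- stated objective: alternative
-- what changed: B drops A's imperative m-by-n dp table, its nested index loops and its float('inf') sentinels: each dp row is built by structural recursion from the right (bottom_row/mid_row) and a single rolling row is folded bottom-up over the grid.
import Mathlib
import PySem

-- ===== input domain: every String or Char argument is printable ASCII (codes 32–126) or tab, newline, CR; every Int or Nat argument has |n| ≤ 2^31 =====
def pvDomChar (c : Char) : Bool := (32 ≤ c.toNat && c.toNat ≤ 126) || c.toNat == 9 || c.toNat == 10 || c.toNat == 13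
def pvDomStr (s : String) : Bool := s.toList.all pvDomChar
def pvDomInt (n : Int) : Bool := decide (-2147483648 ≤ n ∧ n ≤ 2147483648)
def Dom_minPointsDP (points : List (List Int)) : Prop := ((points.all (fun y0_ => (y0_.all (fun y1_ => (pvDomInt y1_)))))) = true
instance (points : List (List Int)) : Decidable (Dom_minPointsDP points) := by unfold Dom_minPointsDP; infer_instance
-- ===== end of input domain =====

-- B replaces A's index-driven m×n dp table (with float('inf') sentinels) by a rolling
-- single dp row built by right-to-left structural recursion; alternative decomposition.

-- ===== PORT A =====
-- Option Int models Python's int-or-float('inf') dp entries: none = float('inf').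
def pvMinInf : Option Int → Option Int → Option Int
  | none, y => y
  | x, none => x
  | some a, some b => some (min a b)

def pvPts (points : List (List Int)) (i j : Int) : Int :=
  PySem.List.pyGetD (PySem.List.pyGetD points i []) j 0

def pvGet2 (dp : List (List (Option Int))) (i j : Int) : Option Int :=
  PySem.List.pyGetD (PySem.List.pyGetD dp i []) j none

-- dp[i][j] = v (always in range when reached under Pre_)
def pvSet2 (dp : List (List (Option Int))) (i j : Int) (v : Option Int) : List (List (Option Int)) :=
  PySem.List.pySetD dp i (PySem.List.pySetD (PySem.List.pyGetD dp i []) j v)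

-- one inner-loop step of A (body of the j loop)
def pvInner (points : List (List Int)) (m n i : Int)
    (dp : List (List (Option Int))) (j : Int) : List (List (Option Int)) :=
  if i == m - 1 && j == n - 1 then
    pvSet2 dp i j (some (max 1 (1 - pvPts points i j)))
  else
    let right := if j + 1 < n then pvGet2 dp i (j + 1) else none
    let bottom := if i + 1 < m then pvGet2 dp (i + 1) j else none
    pvSet2 dp i j ((pvMinInf right bottom).map (fun v => max 1 (v - pvPts points i j)))

def minPointsDP (points : List (List Int)) : Int :=
  let m : Int := points.length
  let n : Int := (PySem.List.pyGetD points 0 []).length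
  let dp0 : List (List (Option Int)) :=
    (List.range m.toNat).map (fun _ => List.replicate n.toNat (none : Option Int))
  let dp := (PySem.List.pyRange (m - 1) (-1) (-1)).foldl
    (fun dp i => (PySem.List.pyRange (n - 1) (-1) (-1)).foldl
      (fun dp j => pvInner points m n i dp j) dp) dp0
  (pvGet2 dp 0 0).getD 0   -- dp[0][0]; always an assigned int cell under Pre_

-- ===== PORT B =====
-- bottom_row: dp row for the bottom grid row, recursion from the right
-- (suf[0] never raises in Python: suf is nonempty there; headD 0 is exact)
def pvBotRow : List Int → List Int
  | [] => []                 -- unreachable under Pre_ (Python would recurse forever)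
  | [p] => [max 1 (1 - p)]
  | p :: rest =>
    let suf := pvBotRow rest
    (max 1 (suf.headD 0 - p)) :: suf

-- mid_row: dp row given the dp row directly below
def pvMidRow : List Int → List Int → List Int
  | [], _ => []              -- unreachable under Pre_
  | [p], b => [max 1 (b.headD 0 - p)]
  | p :: rest, b =>
    let suf := pvMidRow rest b.tail
    (max 1 (min (suf.headD 0) (b.headD 0) - p)) :: suf

def minPointsDP_alt (points : List (List Int)) : Int :=
  let n : Nat := (PySem.List.pyGetD points 0 []).length
  let below0 := pvBotRow ((PySem.List.pyGetD points (-1) []).take n)   -- points[-1][:n]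
  let below := ((PySem.List.slice points none (some (-1))).reverse).foldl
    (fun b row => pvMidRow (row.take n) b) below0                      -- reversed(points[:-1])
  below.headD 0                                                        -- below[0]

-- ===== PRECONDITION & SPEC =====
-- A raises IndexError unless points is nonempty, its first row is nonempty, and every
-- row has at least len(points[0]) entries; exactly those inputs are excluded.
def Pre_minPointsDP (points : List (List Int)) : Prop :=
  points ≠ [] ∧ (points.headD []).length ≠ 0 ∧
    ∀ row ∈ points, (points.headD []).length ≤ row.length
instance (points : List (List Int)) : Decidable (Pre_minPointsDP points) := by
  unfold Pre_minPointsDP; infer_instance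

def pvWitness_minPointsDP : List (List Int) := [[1, -3], [-2, 4]]

def Spec_minPointsDP (points : List (List Int)) (out : Int) : Prop := out = minPointsDP_alt points
instance (points : List (List Int)) (out : Int) : Decidable (Spec_minPointsDP points out) := by
  unfold Spec_minPointsDP; infer_instance

-- ===== CLAIM (what is proved, stated in full; the proofs are below) =====
def Claim_equal_minPointsDP : Prop := ∀ (points : List (List Int)),
  Dom_minPointsDP points → Pre_minPointsDP points → Spec_minPointsDP points (minPointsDP points)

-- ===== LEMMAS AND PROOFS =====

-- the stack of dp rows, bottom row last (proof-level description of A's table)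
def pvRows : List (List Int) → List (List Int)
  | [] => []
  | [r] => [pvBotRow r]
  | r :: rest => pvMidRow r ((pvRows rest).headD []) :: pvRows rest

theorem pvBotRow_length (r : List Int) : (pvBotRow r).length = r.length := by
  induction r with
  | nil => rfl
  | cons p rest ih =>
    cases rest with
    | nil => rfl
    | cons q t => simpa [pvBotRow] using ih

theorem pvMidRow_length (r b : List Int) : (pvMidRow r b).length = r.length := by
  induction r generalizing b with
  | nil => rfl
  | cons p rest ih =>
    cases rest with
    | nil => rfl
    | cons q t => simp [pvMidRow, ih]

theorem pvBotRow_drop1 (r : List Int) : (pvBotRow r).drop 1 = pvBotRow (r.drop 1) := by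
  match r with
  | [] => rfl
  | [p] => rfl
  | p :: q :: t => simp [pvBotRow]

theorem pvBotRow_drop (r : List Int) (k : Nat) :
    (pvBotRow r).drop k = pvBotRow (r.drop k) := by
  induction k generalizing r with
  | zero => rfl
  | succ k ih =>
    have h1 : (pvBotRow r).drop (k + 1) = ((pvBotRow r).drop 1).drop k := by
      rw [List.drop_drop]; ring_nf
    rw [h1, pvBotRow_drop1, ih]
    rw [List.drop_drop]; ring_nf

theorem pvMidRow_drop1 (r b : List Int) :
    (pvMidRow r b).drop 1 = pvMidRow (r.drop 1) (b.drop 1) := by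
  match r with
  | [] => rfl
  | [p] => rfl
  | p :: q :: t => simp [pvMidRow]

theorem pvMidRow_drop (r b : List Int) (k : Nat) :
    (pvMidRow r b).drop k = pvMidRow (r.drop k) (b.drop k) := by
  induction k generalizing r b with
  | zero => rfl
  | succ k ih =>
    have h1 : (pvMidRow r b).drop (k + 1) = ((pvMidRow r b).drop 1).drop k := by
      rw [List.drop_drop]; ring_nf
    rw [h1, pvMidRow_drop1, ih]
    rw [List.drop_drop, List.drop_drop]; ring_nf

theorem pvBotRow_cons (p : Int) (rest : List Int) :
    pvBotRow (p :: rest) =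
      max 1 ((if rest.isEmpty then 1 else (pvBotRow rest).headD 0) - p) :: pvBotRow rest := by
  cases rest with
  | nil => rfl
  | cons q t => simp [pvBotRow]

theorem pvMidRow_cons (p : Int) (rest b : List Int) :
    pvMidRow (p :: rest) b =
      max 1 ((if rest.isEmpty then b.headD 0
              else min ((pvMidRow rest b.tail).headD 0) (b.headD 0)) - p)
        :: pvMidRow rest b.tail := by
  cases rest with
  | nil => rfl
  | cons q t => simp [pvMidRow]


theorem pv_getD_eq_headD_drop {α : Type} (l : List α) (n : Nat) (d : α) :
    l.getD n d = (l.drop n).headD d := by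
  induction l generalizing n with
  | nil => simp
  | cons x t ih => cases n with
    | zero => rfl
    | succ n => exact ih n

theorem pv_drop_cons {α : Type} (l : List α) (k : Nat) (d : α) (h : k < l.length) :
    l.drop k = (l.drop k).headD d :: l.drop (k + 1) := by
  cases hd : l.drop k with
  | nil => have := List.length_drop (i := k) (l := l); rw [hd] at this; simp at this; omega
  | cons x t =>
    have ht : l.drop (k + 1) = t := by
      have : (l.drop k).tail = l.drop (k + 1) := by rw [List.tail_drop]
      rw [hd] at this; simpa using this.symm
    rw [ht]; rfl

theorem pv_headD_drop_map_some (R : List Int) (k : Nat) (h : k < R.length) :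
    ((R.map some).drop k).headD none = some ((R.drop k).headD 0) := by
  rw [← List.map_drop]
  rw [pv_drop_cons R k 0 h]
  rfl

theorem pv_getD_set_self {α : Type} (l : List α) (i : Nat) (v d : α) (h : i < l.length) :
    (l.set i v).getD i d = v := by
  rw [List.getD_eq_getElem _ _ (by simpa using h)]
  simp [List.getElem_set_self]

theorem pv_getD_set_ne {α : Type} (l : List α) (i j : Nat) (v d : α) (h : i ≠ j) :
    (l.set i v).getD j d = l.getD j d := by
  by_cases hj : j < l.length
  · rw [List.getD_eq_getElem _ _ (by simpa using hj), List.getD_eq_getElem _ _ hj]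
    simp [List.getElem_set_ne h]
  · rw [List.getD_eq_default _ _ (by simpa using hj), List.getD_eq_default _ _ (by omega)]

theorem pv_drop_set {α : Type} (l : List α) (k : Nat) (v : α) (h : k < l.length) :
    (l.set k v).drop k = v :: l.drop (k + 1) := by
  rw [List.drop_set]
  simp only [lt_irrefl, if_false, Nat.sub_self]
  rw [pv_drop_cons l k v h]
  rfl

-- A's inner loop over j fills dp row i with the functional row R
theorem pv_inner_fold
    (P : List (List Int)) (n i : Nat) (hi : i < P.length)
    (b R : List Int) (hn : 0 < n)
    (hrow : n ≤ (P.getD i []).length)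
    (hblen : i + 1 < P.length → b.length = n)
    (hR : R = if i = P.length - 1 then pvBotRow ((P.getD i []).take n)
              else pvMidRow ((P.getD i []).take n) b) :
    ∀ (k : Nat), k ≤ n → ∀ (dp : List (List (Option Int))) (cur : List (Option Int)),
      dp.length = P.length → cur.length = n →
      cur.drop k = (R.map some).drop k →
      (i + 1 < P.length → dp.getD (i + 1) [] = b.map some) →
      (PySem.List.pyRange ((k : Int) - 1) (-1) (-1)).foldl
          (fun dp j => pvInner P (P.length : Int) (n : Int) (i : Int) dp j) (dp.set i cur)
        = dp.set i (R.map some) := by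
  have htr : ((P.getD i []).take n).length = n := by rw [List.length_take]; omega
  have hRlen : R.length = n := by
    rw [hR]; split
    · rw [pvBotRow_length, htr]
    · rw [pvMidRow_length, htr]
  intro k
  induction k with
  | zero =>
    intro _ dp cur hdp hcur hsuf _
    have : cur = R.map some := by simpa using hsuf
    rw [this]
    rw [PySem.List.pyRange_neg_one_eq_nil (by omega)]
    rfl
  | succ k ih =>
    intro hk dp cur hdp hcur hsuf hbelow
    have hks : ((k + 1 : Nat) : Int) - 1 = (k : Nat) := by omega
    rw [hks, PySem.List.pyRange_neg_one_cons (by omega)]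
    rw [List.foldl_cons]
    -- the value written at column k
    set tr := (P.getD i []).take n with htrdef
    have hkn : k < n := by omega
    have hptk : pvPts P (i : Int) (k : Int) = tr.getD k 0 := by
      simp only [pvPts, PySem.List.pyGetD_natCast]
      rw [List.getD_eq_getElem _ _ (show k < (P.getD i []).length by omega),
          List.getD_eq_getElem _ _ (show k < tr.length by rw [htr]; omega)]
      exact (List.getElem_take).symm
    -- dp row accesses in the state dp.set i cur
    have hget_cur : PySem.List.pyGetD (dp.set i cur) (i : Int) [] = cur := by
      rw [PySem.List.pyGetD_natCast, pv_getD_set_self _ _ _ _ (by omega)]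
    have hcast1 : ((k : Int) + 1) = ((k + 1 : Nat) : Int) := by push_cast; ring
    have hcast2 : ((i : Int) + 1) = ((i + 1 : Nat) : Int) := by push_cast; ring
    have htrk : tr.drop k = tr.getD k 0 :: tr.drop (k + 1) := by
      rw [pv_getD_eq_headD_drop]
      exact pv_drop_cons tr k 0 (by omega)
    have hset2 : ∀ v : Option Int,
        pvSet2 (dp.set i cur) (i : Int) (k : Int) v = dp.set i (cur.set k v) := by
      intro v
      simp only [pvSet2, hget_cur, PySem.List.pySetD_natCast]
      rw [List.set_set]
    have hstep : pvInner P (P.length : Int) (n : Int) (i : Int) (dp.set i cur) (k : Int)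
        = dp.set i (cur.set k (some ((R.drop k).headD 0))) := by
      by_cases hcase : i = P.length - 1 ∧ k = n - 1
      · -- bottom-right cell
        have hc : (((i : Int) == (P.length : Int) - 1) && ((k : Int) == (n : Int) - 1)) = true := by
          rw [Bool.and_eq_true, beq_iff_eq, beq_iff_eq]
          constructor <;> · omega
        simp only [pvInner, hc, if_true]
        rw [hset2, hptk]
        have hdropk : tr.drop k = [tr.getD k 0] := by
          rw [htrk]
          have : tr.drop (k + 1) = [] := by
            apply List.drop_eq_nil_of_le; omega
          rw [this]
        have hRk : R.drop k = [max 1 (1 - tr.getD k 0)] := by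
          rw [hR, if_pos hcase.1, pvBotRow_drop, hdropk]
          rfl
        rw [hRk]
        rfl
      · have hc : (((i : Int) == (P.length : Int) - 1) && ((k : Int) == (n : Int) - 1)) = false := by
          rw [Bool.and_eq_false_iff, beq_eq_false_iff_ne, beq_eq_false_iff_ne]
          by_cases h1 : i = P.length - 1
          · right; intro h; exact hcase ⟨h1, by omega⟩
          · left; intro h; exact h1 (by omega)
        simp only [pvInner, hc, Bool.false_eq_true, if_false]
        rw [hset2]
        congr 1
        by_cases hlast : i = P.length - 1
        · -- bottom row, k < n - 1
          have hkn1 : k < n - 1 := by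
            rcases Nat.lt_or_ge k (n - 1) with h | h
            · exact h
            · exact absurd ⟨hlast, by omega⟩ hcase
          rw [if_pos (show (k : Int) + 1 < (n : Int) by omega),
              if_neg (show ¬((i : Int) + 1 < (P.length : Int)) by omega)]
          have hright : pvGet2 (dp.set i cur) (i : Int) ((k : Int) + 1)
              = some ((R.drop (k + 1)).headD 0) := by
            simp only [pvGet2, hget_cur, hcast1, PySem.List.pyGetD_natCast]
            rw [pv_getD_eq_headD_drop, hsuf]
            exact pv_headD_drop_map_some R (k + 1) (by omega)
          rw [hright]
          simp only [pvMinInf, Option.map_some]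
          rw [hptk]
          have hRk : R.drop k = pvBotRow (tr.getD k 0 :: tr.drop (k + 1)) := by
            rw [hR, if_pos hlast, pvBotRow_drop, htrk]
          rw [hRk, pvBotRow_cons]
          have hne : (tr.drop (k + 1)).isEmpty = false := by
            rw [List.isEmpty_eq_false_iff]
            intro h
            have := List.length_drop (i := k + 1) (l := tr)
            rw [h] at this; simp at this; omega
          rw [hne]
          have : pvBotRow (tr.drop (k + 1)) = R.drop (k + 1) := by
            rw [hR, if_pos hlast, pvBotRow_drop]
          rw [this]
          rfl
        · have hi1 : i + 1 < P.length := by omega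
          have hbot : pvGet2 (dp.set i cur) ((i : Int) + 1) (k : Int)
              = some ((b.drop k).headD 0) := by
            simp only [pvGet2, hcast2, PySem.List.pyGetD_natCast]
            rw [pv_getD_set_ne _ _ _ _ _ (by omega), hbelow hi1]
            rw [pv_getD_eq_headD_drop]
            exact pv_headD_drop_map_some b k (by have := hblen hi1; omega)
          rw [if_pos (show (i : Int) + 1 < (P.length : Int) by omega)]
          have hRmid : R = pvMidRow tr b := by rw [hR, if_neg hlast]
          by_cases hklast : k = n - 1
          · rw [if_neg (show ¬((k : Int) + 1 < (n : Int)) by omega), hbot]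
            simp only [pvMinInf, Option.map_some]
            rw [hptk]
            have hRk : R.drop k = pvMidRow (tr.getD k 0 :: tr.drop (k + 1)) (b.drop k) := by
              rw [hRmid, pvMidRow_drop, htrk]
            rw [hRk, pvMidRow_cons]
            have hemp : (tr.drop (k + 1)).isEmpty = true := by
              rw [List.isEmpty_iff]
              apply List.drop_eq_nil_of_le; omega
            rw [hemp]
            rfl
          · have hkn1 : k < n - 1 := by omega
            rw [if_pos (show (k : Int) + 1 < (n : Int) by omega), hbot]
            have hright : pvGet2 (dp.set i cur) (i : Int) ((k : Int) + 1)
                = some ((R.drop (k + 1)).headD 0) := by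
              simp only [pvGet2, hget_cur, hcast1, PySem.List.pyGetD_natCast]
              rw [pv_getD_eq_headD_drop, hsuf]
              exact pv_headD_drop_map_some R (k + 1) (by omega)
            rw [hright]
            simp only [pvMinInf, Option.map_some]
            rw [hptk]
            have hRk : R.drop k = pvMidRow (tr.getD k 0 :: tr.drop (k + 1)) (b.drop k) := by
              rw [hRmid, pvMidRow_drop, htrk]
            rw [hRk, pvMidRow_cons]
            have hne : (tr.drop (k + 1)).isEmpty = false := by
              rw [List.isEmpty_eq_false_iff]
              intro h
              have := List.length_drop (i := k + 1) (l := tr)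
              rw [h] at this; simp at this; omega
            rw [hne]
            have htb : (b.drop k).tail = b.drop (k + 1) := by rw [List.tail_drop]
            have : pvMidRow (tr.drop (k + 1)) ((b.drop k).tail) = R.drop (k + 1) := by
              rw [htb, hRmid, pvMidRow_drop]
            rw [this]
            rfl
    rw [hstep]
    have hnew : (cur.set k (some ((R.drop k).headD 0))).drop k = (R.map some).drop k := by
      rw [pv_drop_set _ _ _ (by omega), hsuf]
      rw [← List.map_drop, ← List.map_drop]
      rw [pv_drop_cons R k 0 (by omega)]
      simp
    exact ih (by omega) dp _ hdp (by simpa using hcur) hnew hbelow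


theorem pvRows_length (g : List (List Int)) : (pvRows g).length = g.length := by
  induction g with
  | nil => rfl
  | cons r rest ih =>
    cases rest with
    | nil => rfl
    | cons x t => simp only [pvRows, List.length_cons] at *; omega

theorem pvRows_cons_headD (r : List Int) (rest : List (List Int)) :
    pvRows (r :: rest) = (pvRows (r :: rest)).headD [] :: pvRows rest := by
  cases rest with
  | nil => rfl
  | cons x t => rfl

theorem pvRows_headD (r : List Int) (rest : List (List Int)) :
    (pvRows (r :: rest)).headD []
      = if rest.isEmpty then pvBotRow r else pvMidRow r ((pvRows rest).headD []) := by
  cases rest with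
  | nil => rfl
  | cons x t => rfl

theorem pv_headD_map {α β : Type} (f : α → β) (l : List α) (d : α) (h : l ≠ []) :
    (l.map f).headD (f d) = f (l.headD d) := by
  cases l with
  | nil => exact absurd rfl h
  | cons x t => rfl

theorem pv_set_replicate_append {α : Type} (i0 : Nat) (x v : α) (t : List α) :
    (List.replicate (i0 + 1) x ++ t).set i0 v = List.replicate i0 x ++ v :: t := by
  rw [List.set_append, if_pos (by simp)]
  rw [List.replicate_succ', List.set_append, if_neg (by simp)]
  simp

theorem pv_range_map_const {α : Type} (k : Nat) (c : α) :
    (List.range k).map (fun _ => c) = List.replicate k c := by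
  induction k with
  | zero => rfl
  | succ k ih => rw [List.range_succ, List.map_append, ih, List.replicate_succ']; rfl

theorem pv_getD_zero_headD {α : Type} (l : List α) (d : α) : l.getD 0 d = l.headD d := by
  cases l <;> rfl

theorem pv_getD_append_right {α : Type} (l1 l2 : List α) (k : Nat) (d : α) :
    (l1 ++ l2).getD (l1.length + k) d = l2.getD k d := by
  rw [pv_getD_eq_headD_drop, pv_getD_eq_headD_drop]
  congr 1
  induction l1 with
  | nil => simp
  | cons x t ih => simp [Nat.succ_add]

-- A's outer loop over i computes the whole stack of rows from the bottom up
theorem pv_outer_fold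
    (P : List (List Int)) (n : Nat) (hn : 0 < n)
    (hrows : ∀ row ∈ P, n ≤ row.length) :
    ∀ (i0 : Nat), i0 ≤ P.length →
      (PySem.List.pyRange ((i0 : Int) - 1) (-1) (-1)).foldl
          (fun dp i => (PySem.List.pyRange ((n : Int) - 1) (-1) (-1)).foldl
            (fun dp j => pvInner P (P.length : Int) (n : Int) i dp j) dp)
          (List.replicate i0 (List.replicate n (none : Option Int)) ++
            (pvRows ((P.map (fun r => r.take n)).drop i0)).map (List.map some))
        = (pvRows (P.map (fun r => r.take n))).map (List.map some) := by
  intro i0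
  induction i0 with
  | zero =>
    intro _
    have h0 : PySem.List.pyRange (((0 : Nat) : Int) - 1) (-1) (-1) = [] :=
      PySem.List.pyRange_neg_one_eq_nil (by omega)
    rw [h0]
    simp
  | succ i0 ih =>
    intro hle
    have hi0 : i0 < P.length := by omega
    set G := P.map (fun r => r.take n) with hG
    have hGlen : G.length = P.length := by rw [hG, List.length_map]
    have hrowi : n ≤ (P.getD i0 []).length := by
      apply hrows
      rw [List.getD_eq_getElem _ _ hi0]
      exact List.getElem_mem _
    set tr := (P.getD i0 []).take n with htr
    have hGdrop : G.drop i0 = tr :: G.drop (i0 + 1) := by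
      rw [List.drop_eq_getElem_cons (show i0 < G.length by omega)]
      have : G[i0]'(by omega) = tr := by
        simp only [hG, List.getElem_map, htr]
        congr 1
        rw [List.getD_eq_getElem _ _ hi0]
      rw [this]
    set b : List Int := (pvRows (G.drop (i0 + 1))).headD [] with hb
    set R : List Int := (pvRows (G.drop i0)).headD [] with hRdef
    have hRchar : R = if i0 = P.length - 1 then pvBotRow tr else pvMidRow tr b := by
      rw [hRdef, hGdrop, pvRows_headD]
      by_cases hl : i0 = P.length - 1
      · rw [if_pos hl, if_pos]
        rw [List.isEmpty_iff, List.drop_eq_nil_iff]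
        omega
      · rw [if_neg hl, if_neg, hb]
        rw [List.isEmpty_iff, List.drop_eq_nil_iff]
        omega
    have hblen : i0 + 1 < P.length → b.length = n := by
      intro h1
      have hGd : G.drop (i0 + 1) = G[i0 + 1] :: G.drop (i0 + 2) := by
        rw [List.drop_eq_getElem_cons (by omega)]
      have hGlen2 : G[i0 + 1]'(by omega) = (P[i0 + 1]'(by omega)).take n := by
        simp only [hG, List.getElem_map]
      rw [hb, hGd, pvRows_headD]
      split
      · rw [hGlen2, pvBotRow_length, List.length_take]
        have := hrows (P[i0 + 1]'(by omega)) (List.getElem_mem _)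
        omega
      · rw [hGlen2, pvMidRow_length, List.length_take]
        have := hrows (P[i0 + 1]'(by omega)) (List.getElem_mem _)
        omega
    set blank : List (Option Int) := List.replicate n (none : Option Int) with hblank
    set st : List (List (Option Int)) :=
      List.replicate (i0 + 1) blank ++ (pvRows (G.drop (i0 + 1))).map (List.map some) with hst
    have hstlen : st.length = P.length := by
      rw [hst, List.length_append, List.length_replicate, List.length_map, pvRows_length,
          List.length_drop, hGlen]
      omega
    have hset_self : st.set i0 blank = st := by
      rw [hst, List.set_append, if_pos (by simp)]
      congr 1
      rw [List.replicate_succ', List.set_append, if_neg (by simp)]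
      simp
    have hbelow : i0 + 1 < P.length → st.getD (i0 + 1) [] = b.map some := by
      intro h1
      have hidx : st.getD (i0 + 1) []
          = ((pvRows (G.drop (i0 + 1))).map (List.map some)).getD 0 [] := by
        rw [hst]
        have h := pv_getD_append_right (List.replicate (i0 + 1) blank)
          ((pvRows (G.drop (i0 + 1))).map (List.map some)) 0 ([])
        simpa using h
      rw [hidx, pv_getD_zero_headD]
      cases hpv : pvRows (G.drop (i0 + 1)) with
      | nil =>
        exfalso
        have := pvRows_length (G.drop (i0 + 1))
        rw [hpv] at this
        simp [List.length_drop, hGlen] at this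
        omega
      | cons y t =>
        rw [hb, hpv]
        rfl
    have hcast : ((i0 + 1 : Nat) : Int) - 1 = ((i0 : Nat) : Int) := by push_cast; ring
    have hr : PySem.List.pyRange ((i0 : Nat) : Int) (-1) (-1)
        = ((i0 : Nat) : Int) :: PySem.List.pyRange (((i0 : Nat) : Int) - 1) (-1) (-1) :=
      PySem.List.pyRange_neg_one_cons (by omega)
    rw [hcast, hr, List.foldl_cons]
    have hinner := pv_inner_fold P n i0 hi0 b R hn hrowi hblen hRchar n (le_refl n)
      st blank hstlen (by rw [hblank, List.length_replicate])
      (by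
        rw [List.drop_eq_nil_of_le (by rw [hblank, List.length_replicate]),
            List.drop_eq_nil_of_le]
        rw [List.length_map]
        rw [hRchar]
        split
        · rw [pvBotRow_length, htr, List.length_take]; omega
        · rw [pvMidRow_length, htr, List.length_take]; omega)
      hbelow
    rw [hset_self] at hinner
    rw [hinner]
    have hstset : st.set i0 (R.map some)
        = List.replicate i0 blank ++ (pvRows (G.drop i0)).map (List.map some) := by
      rw [hst, pv_set_replicate_append]
      congr 1
      rw [hGdrop, pvRows_cons_headD, ← hGdrop, ← hRdef]
      rfl
    rw [hstset]
    exact ih (by omega)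

theorem pvRows_head_foldr (l : List (List Int)) (r : List Int) :
    (pvRows (l ++ [r])).headD [] = l.foldr (fun row b => pvMidRow row b) (pvBotRow r) := by
  induction l with
  | nil => rfl
  | cons x t ih =>
    rw [List.cons_append, pvRows_headD, if_neg (by simp), ih]
    rfl

-- ===== VERDICT (by name: the statement is the Claim_ definition above) =====
theorem minPointsDP_spec : Claim_equal_minPointsDP := by
  intro P _ hpre
  obtain ⟨hPne, hn0, hrows⟩ := hpre
  unfold Spec_minPointsDP
  set n : Nat := (P.headD []).length with hn
  have hget0 : PySem.List.pyGetD P 0 ([] : List Int) = P.headD [] := by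
    rw [PySem.List.pyGetD_zero, pv_getD_zero_headD]
  have hPlen : 0 < P.length := List.length_pos_iff.mpr hPne
  set G : List (List Int) := P.map (fun r => r.take n) with hG
  set F : List Int :=
    P.dropLast.foldr (fun row b => pvMidRow (row.take n) b)
      (pvBotRow ((P.getLast hPne).take n)) with hF
  -- the head dp row, characterised as the rolling foldr
  have hsplit : G = (P.dropLast.map (fun r => r.take n)) ++ [(P.getLast hPne).take n] := by
    conv_lhs => rw [hG, ← List.dropLast_append_getLast hPne]
    rw [List.map_append]
    rfl
  have hR0 : (pvRows G).headD [] = F := by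
    rw [hsplit, pvRows_head_foldr, hF, List.foldr_map]
  have hR0len : ((pvRows G).headD []).length = n := by
    have hGne : G ≠ [] := by
      rw [hG]; intro h; rw [List.map_eq_nil_iff] at h; exact hPne h
    cases hGc : G with
    | nil => exact absurd hGc hGne
    | cons g0 G' =>
      have hg0 : g0 = (P.headD []).take n := by
        have : G.headD [] = g0 := by rw [hGc]; rfl
        rw [← this, hG]
        cases P with
        | nil => exact absurd rfl hPne
        | cons p t => rfl
      rw [pvRows_headD]
      have hlen : g0.length = n := by
        rw [hg0, List.length_take]
        omega
      split
      · rw [pvBotRow_length, hlen]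
      · rw [pvMidRow_length, hlen]
  -- evaluate port A via the outer-loop lemma
  have hA : minPointsDP P = ((pvRows G).headD []).headD 0 := by
    simp only [minPointsDP, hget0]
    have hm : ((P.length : Int)).toNat = P.length := Int.toNat_natCast _
    have hnn : (((P.headD []).length : Int)).toNat = n := Int.toNat_natCast _
    rw [hm, hnn, pv_range_map_const]
    have hdropG : (pvRows (G.drop P.length)).map (List.map some) = [] := by
      rw [List.drop_eq_nil_of_le (by rw [hG, List.length_map])]
      rfl
    have houter := pv_outer_fold P n (by omega) hrows P.length (le_refl _)
    rw [hdropG, List.append_nil] at houter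
    rw [houter, ← hG]
    -- dp[0][0]
    simp only [pvGet2, PySem.List.pyGetD_zero, pv_getD_zero_headD]
    have hmapne : pvRows G ≠ [] := by
      intro h
      have := pvRows_length G
      rw [h, hG] at this
      simp at this
      omega
    have hh : ((pvRows G).map (List.map some)).headD [] = List.map some ((pvRows G).headD []) := by
      simpa using pv_headD_map (List.map some) (pvRows G) [] hmapne
    rw [hh]
    have h2 := pv_headD_drop_map_some ((pvRows G).headD []) 0 (by omega)
    simp only [List.drop_zero] at h2
    rw [h2]
    rfl
  -- evaluate port B
  have hB : minPointsDP_alt P = F.headD 0 := by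
    simp only [minPointsDP_alt, hget0]
    rw [PySem.List.pyGetD_neg_one P [] hPne, PySem.List.slice_to_neg_one,
        List.foldl_reverse]
  rw [hA, hB, hR0]
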